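-- pv_equiv track=rewrite | github.com/bkhangha/AI-Lab02 | Project02_logic/PS4/SRC/pl_resolution.py | add_recursive
-- ===== SOURCE A (Python) =====
-- import copy
--
-- def neg(literal):
--     l = copy.deepcopy(literal)
--
--     if '-' in literal:
--         return literal.replace('-', '')
--     else:
--         return '-' + l
--
-- def add_recursive(lst, alpha_list):
--     if len(alpha_list) == 0:
--         return lst
--     if len(lst) == 0:
--         for i in alpha_list[0]:
--             lst.append([i])
--         return add_recursive(lst, alpha_list[1:len(alpha_list)])
--     else:
--         temp = []
--         for i in lst:
--             for j in alpha_list[0]: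
--                 if neg(j) not in i:
--                     temp.append(i + [j])
--         return add_recursive(temp, alpha_list[1:len(alpha_list)])
-- ===== SOURCE B (Python) =====
-- def neg(literal):
--     if '-' in literal:
--         return literal.replace('-', '')
--     else:
--         return '-' + literal
--
-- def add_recursive(lst, alpha_list):
--     # Single fold; an empty accumulator is re-seeded with the one empty clause [[]],
--     # which makes the "populate with singletons" case a plain instance of the general step.
--     acc = lst
--     for alpha in alpha_list:
--         acc = [i + [j] for i in (acc if acc else [[]]) for j in alpha if neg(j) not in i]
--     return acc
-- ===== Notes on version B (the rewrite author's own statement) =====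
-- stated objective: simpler
-- what changed: Replaces A's recursion with its two duplicated branches by a single fold of one uniform comprehension step, re-seeding an empty accumulator with the one empty clause [[]] so the singleton-populating branch disappears.
import Mathlib
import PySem

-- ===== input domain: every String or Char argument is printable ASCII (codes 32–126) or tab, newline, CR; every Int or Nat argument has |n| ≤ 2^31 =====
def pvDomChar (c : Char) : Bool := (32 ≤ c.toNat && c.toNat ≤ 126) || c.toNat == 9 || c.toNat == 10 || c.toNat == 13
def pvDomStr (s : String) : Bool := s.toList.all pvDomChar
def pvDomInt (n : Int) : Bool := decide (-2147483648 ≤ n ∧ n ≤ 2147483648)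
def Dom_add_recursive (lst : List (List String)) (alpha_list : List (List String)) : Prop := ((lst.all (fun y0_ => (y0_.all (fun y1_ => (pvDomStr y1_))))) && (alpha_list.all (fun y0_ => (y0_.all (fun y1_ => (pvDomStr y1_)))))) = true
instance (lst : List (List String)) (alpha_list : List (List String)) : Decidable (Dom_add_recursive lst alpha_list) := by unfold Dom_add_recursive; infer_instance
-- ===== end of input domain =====

-- B folds one uniform step over alpha_list, re-seeding an empty accumulator with [[]] so the
-- singleton-populating branch disappears; return-value equivalence only (A mutates an empty caller lst in place, B does not).

-- ===== PORT A =====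
-- helper neg (shared verbatim by both Pythons)
def neg (literal : String) : String :=
  if PySem.Str.isIn "-" literal then PySem.Str.replace literal "-" ""
  else "-" ++ literal

def add_recursive (lst : List (List String)) (alpha_list : List (List String)) : List (List String) :=
  match alpha_list with
  | [] => lst
  | alpha0 :: rest =>                       -- alpha_list[1:len(alpha_list)] is the tail
    if lst.length == 0 then
      add_recursive (alpha0.foldl (fun l i => l ++ [[i]]) lst) rest
    else
      add_recursive
        (lst.foldl (fun temp i =>
            alpha0.foldl (fun temp j =>
                if !(i.contains (neg j)) then temp ++ [i ++ [j]] else temp) temp) []) rest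

-- ===== PORT B =====
def add_recursive_alt (lst : List (List String)) (alpha_list : List (List String)) : List (List String) :=
  alpha_list.foldl (fun acc alpha =>
    (if acc.isEmpty then [[]] else acc).flatMap (fun i =>
      alpha.filterMap (fun j => if i.contains (neg j) then none else some (i ++ [j])))) lst

-- ===== PRECONDITION & SPEC =====
def Spec_add_recursive (lst : List (List String)) (alpha_list : List (List String)) (out : List (List String)) : Prop := out = add_recursive_alt lst alpha_list
instance (lst : List (List String)) (alpha_list : List (List String)) (out : List (List String)) : Decidable (Spec_add_recursive lst alpha_list out) := by unfold Spec_add_recursive; infer_instance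

-- ===== CLAIM (what is proved, stated in full; the proofs are below) =====
def Claim_equal_add_recursive : Prop := ∀ (lst : List (List String)) (alpha_list : List (List String)), Dom_add_recursive lst alpha_list → Spec_add_recursive lst alpha_list (add_recursive lst alpha_list)

-- ===== LEMMAS AND PROOFS =====

-- B's one uniform step
def bStep (acc : List (List String)) (alpha : List String) : List (List String) :=
  (if acc.isEmpty then [[]] else acc).flatMap (fun i =>
    alpha.filterMap (fun j => if i.contains (neg j) then none else some (i ++ [j])))

theorem alt_eq_foldl_bStep (lst alpha_list : List (List String)) :
    add_recursive_alt lst alpha_list = alpha_list.foldl bStep lst := rfl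

-- A's inner append loop equals B's filterMap over one fixed i
theorem inner_eq (i : List String) (alpha0 : List String) (temp : List (List String)) :
    alpha0.foldl (fun temp j => if neg j ∈ i then temp else temp ++ [i ++ [j]]) temp
      = temp ++ alpha0.filterMap (fun j => if i.contains (neg j) then none else some (i ++ [j])) := by
  induction alpha0 generalizing temp with
  | nil => simp
  | cons j js ih => by_cases h : neg j ∈ i <;> simp [h, ih]

-- A's nested temp-building loop is B's step on a non-empty accumulator
theorem temp_eq_bStep (lst : List (List String)) (alpha0 : List String) :
    lst.foldl (fun temp i =>
        alpha0.foldl (fun temp j => if neg j ∈ i then temp else temp ++ [i ++ [j]]) temp) []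
      = lst.flatMap (fun i =>
          alpha0.filterMap (fun j => if i.contains (neg j) then none else some (i ++ [j]))) := by
  simp only [inner_eq]
  simpa using PySem.List.foldl_append_eq_flatMap
    (fun i => alpha0.filterMap (fun j => if i.contains (neg j) then none else some (i ++ [j]))) lst []

-- A's empty-accumulator population is B's step seeded with [[]]
theorem empty_eq_bStep (alpha0 : List String) :
    alpha0.foldl (fun l i => l ++ [[i]]) ([] : List (List String)) = bStep [] alpha0 := by
  have h : ∀ t : List (List String),
      alpha0.foldl (fun l i => l ++ [[i]]) t = t ++ alpha0.map (fun i => [i]) := by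
    induction alpha0 with
    | nil => simp
    | cons i is ih => intro t; simp [ih]
  rw [h]
  simp [bStep]

theorem add_recursive_eq_alt (alpha_list lst : List (List String)) :
    add_recursive lst alpha_list = add_recursive_alt lst alpha_list := by
  induction alpha_list generalizing lst with
  | nil => rfl
  | cons alpha0 rest ih =>
    rw [alt_eq_foldl_bStep, List.foldl_cons, ← alt_eq_foldl_bStep]
    by_cases h : lst = []
    · subst h
      rw [show add_recursive [] (alpha0 :: rest)
            = add_recursive (alpha0.foldl (fun l i => l ++ [[i]]) []) rest
          from rfl, empty_eq_bStep]
      exact ih _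
    · have hne : (lst.length == 0) = false := by
        simp [List.length_eq_zero_iff, h]
      rw [show add_recursive lst (alpha0 :: rest)
            = add_recursive (lst.foldl (fun temp i =>
                alpha0.foldl (fun temp j =>
                  if !(i.contains (neg j)) then temp ++ [i ++ [j]] else temp) temp) []) rest
          by simp [add_recursive, hne]]
      have hstep : bStep lst alpha0
          = lst.flatMap (fun i =>
              alpha0.filterMap (fun j => if i.contains (neg j) then none else some (i ++ [j]))) := by
        simp [bStep, List.isEmpty_iff, h]
      rw [hstep, ← temp_eq_bStep]
      have : (fun (temp : List (List String)) (i : List String) =>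
          alpha0.foldl (fun temp j =>
            if !(i.contains (neg j)) then temp ++ [i ++ [j]] else temp) temp)
        = (fun temp i =>
          alpha0.foldl (fun temp j => if neg j ∈ i then temp else temp ++ [i ++ [j]]) temp) := by
        funext temp i
        congr 1
        funext t j
        by_cases hj : neg j ∈ i <;> simp [hj]
      rw [this]
      exact ih _

-- ===== VERDICT (by name: the statement is the Claim_ definition above) =====
theorem add_recursive_spec : Claim_equal_add_recursive := by
  intro lst alpha_list _
  exact add_recursive_eq_alt alpha_list lst
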